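-- pv_equiv track=rewrite | github.com/charlottefontaine/sites_touristiques | heatmap.py | split_corpus_by_city_criteria
-- ===== SOURCE A (Python) =====
-- def split_corpus_by_city_criteria(corpus, sea_cities, nosea_cities, south_cities, north_cities):
--     """Divise le corpus (liste de dicts) en 4 sous-corpus."""
--     split_data = {
--         "SEA": [],
--         "NOSEA": [],
--         "SOUTH": [],
--         "NORTH": []
--     }
--
--     for doc in corpus:
--         city = doc.get("city")
--         if not city:
--             continue
--
--         if city in sea_cities:
--             split_data["SEA"].append(doc)
--         if city in nosea_cities:
--             split_data["NOSEA"].append(doc)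
--         if city in south_cities:
--             split_data["SOUTH"].append(doc)
--         if city in north_cities:
--             split_data["NORTH"].append(doc)
--
--     return split_data
-- ===== SOURCE B (Python) =====
-- def split_corpus_by_city_criteria(corpus, sea_cities, nosea_cities, south_cities, north_cities):
--     """Divise le corpus en 4 sous-corpus: un passage independant par categorie."""
--     def collect(cities):
--         return [doc for doc in corpus if doc.get("city") and doc.get("city") in cities]
--     return {
--         "SEA": collect(sea_cities),
--         "NOSEA": collect(nosea_cities),
--         "SOUTH": collect(south_cities),
--         "NORTH": collect(north_cities),
--     }
-- ===== Notes on version B (the rewrite author's own statement) =====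
-- stated objective: alternative
-- what changed: Replaced the single multi-branch loop appending into a mutable 4-key dict with four independent filtering passes, one comprehension per category, assembled into a dict literal.
import Mathlib
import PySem

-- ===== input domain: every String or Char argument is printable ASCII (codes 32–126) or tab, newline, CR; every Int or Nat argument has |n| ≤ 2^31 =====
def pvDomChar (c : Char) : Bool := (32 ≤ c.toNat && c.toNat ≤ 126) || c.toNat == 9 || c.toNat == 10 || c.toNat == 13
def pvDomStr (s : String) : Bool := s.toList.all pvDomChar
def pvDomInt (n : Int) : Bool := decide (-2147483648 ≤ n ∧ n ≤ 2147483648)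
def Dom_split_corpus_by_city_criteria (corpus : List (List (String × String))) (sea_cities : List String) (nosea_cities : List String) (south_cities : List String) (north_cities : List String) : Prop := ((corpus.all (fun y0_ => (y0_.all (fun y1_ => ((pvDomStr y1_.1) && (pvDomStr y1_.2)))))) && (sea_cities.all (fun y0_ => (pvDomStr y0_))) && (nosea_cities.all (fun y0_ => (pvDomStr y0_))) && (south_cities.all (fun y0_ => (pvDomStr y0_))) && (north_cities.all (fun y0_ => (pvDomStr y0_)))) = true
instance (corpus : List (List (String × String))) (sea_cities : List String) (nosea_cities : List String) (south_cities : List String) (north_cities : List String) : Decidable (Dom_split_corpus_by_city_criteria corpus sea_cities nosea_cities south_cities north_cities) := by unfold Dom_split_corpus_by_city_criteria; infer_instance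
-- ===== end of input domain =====

-- B replaces A's single multi-branch pass appending into a mutable 4-key dict with four
-- independent filtering passes, one per category (alternative decomposition, same cost class).


-- ===== PORT A =====
-- doc.get("city") on the association-list dict: first matching key, none if absent
def pvDocGet (doc : List (String × String)) (k : String) : Option String :=
  (doc.find? (fun p => p.1 == k)).map (·.2)

-- the body of A's single loop: test the city against all four lists, appending in place
def pvStepA (sea_cities nosea_cities south_cities north_cities : List String)
    (d : PySem.Dict String (List (List (String × String)))) (doc : List (String × String)) :
    PySem.Dict String (List (List (String × String))) :=
  match pvDocGet doc "city" with
  | none => d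
  | some city =>
    if city = "" then d
    else
      let d := if sea_cities.contains city then d.modify "SEA" [] (· ++ [doc]) else d
      let d := if nosea_cities.contains city then d.modify "NOSEA" [] (· ++ [doc]) else d
      let d := if south_cities.contains city then d.modify "SOUTH" [] (· ++ [doc]) else d
      if north_cities.contains city then d.modify "NORTH" [] (· ++ [doc]) else d

def split_corpus_by_city_criteria (corpus : List (List (String × String))) (sea_cities : List String) (nosea_cities : List String) (south_cities : List String) (north_cities : List String) : List (String × List (List (String × String))) :=
  (corpus.foldl (pvStepA sea_cities nosea_cities south_cities north_cities)
      (PySem.Dict.mk [("SEA", []), ("NOSEA", []), ("SOUTH", []), ("NORTH", [])])).items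

-- ===== PORT B =====
-- one independent pass: the docs whose city is truthy and belongs to `cities`
def pvCollect (corpus : List (List (String × String))) (cities : List String) :
    List (List (String × String)) :=
  corpus.filter (fun doc =>
    match pvDocGet doc "city" with
    | none => false
    | some city => city ≠ "" && cities.contains city)

def split_corpus_by_city_criteria_alt (corpus : List (List (String × String))) (sea_cities : List String) (nosea_cities : List String) (south_cities : List String) (north_cities : List String) : List (String × List (List (String × String))) :=
  [("SEA", pvCollect corpus sea_cities),
   ("NOSEA", pvCollect corpus nosea_cities),
   ("SOUTH", pvCollect corpus south_cities),
   ("NORTH", pvCollect corpus north_cities)]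

-- ===== PRECONDITION & SPEC =====
def Spec_split_corpus_by_city_criteria (corpus : List (List (String × String))) (sea_cities : List String) (nosea_cities : List String) (south_cities : List String) (north_cities : List String) (out : List (String × List (List (String × String)))) : Prop := out = split_corpus_by_city_criteria_alt corpus sea_cities nosea_cities south_cities north_cities
instance (corpus : List (List (String × String))) (sea_cities : List String) (nosea_cities : List String) (south_cities : List String) (north_cities : List String) (out : List (String × List (List (String × String)))) : Decidable (Spec_split_corpus_by_city_criteria corpus sea_cities nosea_cities south_cities north_cities out) := by unfold Spec_split_corpus_by_city_criteria; infer_instance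

-- ===== CLAIM (what is proved, stated in full; the proofs are below) =====
def Claim_equal_split_corpus_by_city_criteria : Prop := ∀ (corpus : List (List (String × String))) (sea_cities : List String) (nosea_cities : List String) (south_cities : List String) (north_cities : List String), Dom_split_corpus_by_city_criteria corpus sea_cities nosea_cities south_cities north_cities → Spec_split_corpus_by_city_criteria corpus sea_cities nosea_cities south_cities north_cities (split_corpus_by_city_criteria corpus sea_cities nosea_cities south_cities north_cities)

-- ===== LEMMAS AND PROOFS =====

-- A's loop body on the 4-key state when the doc has no (truthy) city: no change
theorem pvStepA_skip (sea_cities nosea_cities south_cities north_cities : List String)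
    (d : PySem.Dict String (List (List (String × String)))) (doc : List (String × String))
    (h : pvDocGet doc "city" = none ∨ pvDocGet doc "city" = some "") :
    pvStepA sea_cities nosea_cities south_cities north_cities d doc = d := by
  rcases h with h | h <;> simp [pvStepA, h]

-- A's loop body on the 4-key state with a truthy city: append to each matching category
theorem pvStepA_eq (sea_cities nosea_cities south_cities north_cities : List String)
    (doc : List (String × String)) (city : String)
    (hg : pvDocGet doc "city" = some city) (hne : city ≠ "")
    (a b c d : List (List (String × String))) :
    pvStepA sea_cities nosea_cities south_cities north_cities
        (PySem.Dict.mk [("SEA", a), ("NOSEA", b), ("SOUTH", c), ("NORTH", d)]) doc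
      = PySem.Dict.mk
          [("SEA", if sea_cities.contains city then a ++ [doc] else a),
           ("NOSEA", if nosea_cities.contains city then b ++ [doc] else b),
           ("SOUTH", if south_cities.contains city then c ++ [doc] else c),
           ("NORTH", if north_cities.contains city then d ++ [doc] else d)] := by
  simp only [pvStepA, hg, if_neg hne]
  split_ifs <;>
    simp_all [PySem.Dict.modify, PySem.Dict.insert, PySem.Dict.getD, PySem.Dict.get?,
      PySem.Dict.contains]

-- loop invariant: folding A's step from the 4-key dict holding accumulators a b c d
-- appends exactly B's per-category filters
theorem pvFoldA_items (corpus : List (List (String × String)))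
    (sea_cities nosea_cities south_cities north_cities : List String)
    (a b c d : List (List (String × String))) :
    (corpus.foldl (pvStepA sea_cities nosea_cities south_cities north_cities)
        (PySem.Dict.mk [("SEA", a), ("NOSEA", b), ("SOUTH", c), ("NORTH", d)])).items
      = [("SEA", a ++ pvCollect corpus sea_cities),
         ("NOSEA", b ++ pvCollect corpus nosea_cities),
         ("SOUTH", c ++ pvCollect corpus south_cities),
         ("NORTH", d ++ pvCollect corpus north_cities)] := by
  induction corpus generalizing a b c d with
  | nil => simp [pvCollect]
  | cons doc rest ih =>
    rw [List.foldl_cons]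
    cases hg : pvDocGet doc "city" with
    | none =>
      rw [pvStepA_skip _ _ _ _ _ _ (Or.inl hg), ih]
      simp [pvCollect, hg]
    | some city =>
      by_cases hne : city = ""
      · subst hne
        rw [pvStepA_skip _ _ _ _ _ _ (Or.inr hg), ih]
        simp [pvCollect, hg]
      · rw [pvStepA_eq _ _ _ _ _ _ hg hne, ih]
        simp only [pvCollect, List.filter_cons, hg, hne, decide_not]
        split_ifs <;> simp_all

-- ===== VERDICT (by name: the statement is the Claim_ definition above) =====
theorem split_corpus_by_city_criteria_spec : Claim_equal_split_corpus_by_city_criteria := by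
  intro corpus sea nosea south north _
  unfold Spec_split_corpus_by_city_criteria split_corpus_by_city_criteria
  rw [pvFoldA_items]
  simp [split_corpus_by_city_criteria_alt]
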